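-- pv_equiv track=rewrite | github.com/AxelWismer/deutchTest | exams/views.py | is_question_word
-- ===== SOURCE A (Python) =====
-- def is_question_word(word):
--     prev_2 = ''
--     prev = ''
--     for i in word:
--         # Revisa que existan al menos dos caracteres seguidos _ o . y que el caracter anterior sea una letra
--         if (i == '_' or i == '.') and i == prev and prev_2.isalpha():
--             return True
--         else:
--             prev_2 = prev
--             prev = i
--     return False
-- ===== SOURCE B (Python) =====
-- def is_question_word(word):
--     # Locate doubled separators directly with str.find, then verify a letter precedes.
--     for sep in ('__', '..'):
--         start = 1
--         while True:
--             idx = word.find(sep, start)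
--             if idx == -1:
--                 break
--             if word[idx - 1].isalpha():
--                 return True
--             start = idx + 1
--     return False
-- ===== Notes on version B (the rewrite author's own statement) =====
-- stated objective: faster
-- what changed: Replaces the char-by-char prev_2/prev state machine with direct substring search: repeatedly str.find each doubled separator ('__', '..') from position 1 and check that the character before the hit is a letter.
import Mathlib
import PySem

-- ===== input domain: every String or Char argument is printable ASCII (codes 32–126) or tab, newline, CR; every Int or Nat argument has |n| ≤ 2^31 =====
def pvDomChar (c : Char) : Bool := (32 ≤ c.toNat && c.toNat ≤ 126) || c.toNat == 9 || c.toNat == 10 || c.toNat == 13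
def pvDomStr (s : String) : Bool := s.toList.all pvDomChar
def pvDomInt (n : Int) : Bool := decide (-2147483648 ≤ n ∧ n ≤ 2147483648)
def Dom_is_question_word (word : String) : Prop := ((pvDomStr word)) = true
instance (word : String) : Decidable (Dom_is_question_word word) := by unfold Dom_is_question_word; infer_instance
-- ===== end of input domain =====

-- B replaces A's char-by-char prev_2/prev state machine by direct str.find search for the
-- doubled separators '__' and '..', checking that a letter precedes each hit (return value only).

-- ===== PORT A =====
-- the for-loop of A over the characters of word, carrying prev_2 and prev
-- (Python strings, '' or one char, as List Char)
def iqwLoopA : List Char → List Char → List Char → Bool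
  | _, _, [] => false
  | p2, p, c :: rest =>
    if (c = '_' ∨ c = '.') ∧ [c] = p ∧ PySem.Chars.strIsalpha p2 = true then true
    else iqwLoopA p [c] rest

def is_question_word (word : String) : Bool := iqwLoopA [] [] word.toList

-- ===== PORT B =====
-- the inner while-loop of B (fuel only makes the loop total; word.length iterations always suffice,
-- since each pass restarts the search at idx + 1 > start)
def iqwFind (cs sep : List Char) : Nat → Nat → Bool
  | _, 0 => false
  | start, fuel + 1 =>
    let idx : Int := PySem.Chars.findFrom cs sep (start : Int) none
    if idx = -1 then false
    else if PySem.Chars.isalpha (cs.getD (idx.toNat - 1) ' ') = true then true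
    else iqwFind cs sep (idx.toNat + 1) fuel

-- the for-loop over the two separators, unrolled
def is_question_word_alt (word : String) : Bool :=
  if iqwFind word.toList ['_', '_'] 1 word.toList.length then true
  else iqwFind word.toList ['.', '.'] 1 word.toList.length

-- ===== PRECONDITION & SPEC =====
def Spec_is_question_word (word : String) (out : Bool) : Prop := out = is_question_word_alt word
instance (word : String) (out : Bool) : Decidable (Spec_is_question_word word out) := by unfold Spec_is_question_word; infer_instance

-- ===== CLAIM (what is proved, stated in full; the proofs are below) =====
def Claim_equal_is_question_word : Prop := ∀ (word : String), Dom_is_question_word word → Spec_is_question_word word (is_question_word word)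

-- ===== LEMMAS AND PROOFS =====

-- "a doubled separator starts at index j and a letter sits right before it"
def iqwGood (cs : List Char) (j : Nat) : Prop :=
  1 ≤ j ∧ ∃ c, (c = '_' ∨ c = '.') ∧ cs[j]? = some c ∧ cs[j + 1]? = some c ∧
    PySem.Chars.isalpha (cs.getD (j - 1) ' ') = true

theorem iqw_good_shift (x : Char) (l : List Char) (j : Nat) :
    iqwGood (x :: l) (j + 2) ↔ iqwGood l (j + 1) := by
  simp [iqwGood, show j + 2 = (j + 1) + 1 from rfl, List.getElem?_cons_succ]

theorem iqw_loopA_iff (cs : List Char) : ∀ a b : Char,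
    (iqwLoopA [a] [b] cs = true ↔ ∃ j, iqwGood (a :: b :: cs) (j + 1)) := by
  induction cs with
  | nil =>
    intro a b
    simp [iqwLoopA, iqwGood]
  | cons c rest ih =>
    intro a b
    have hs : PySem.Chars.strIsalpha [a] = PySem.Chars.isalpha a := by
      simp [PySem.Chars.strIsalpha]
    have hgood1 : iqwGood (a :: b :: c :: rest) 1 ↔
        ((c = '_' ∨ c = '.') ∧ [c] = [b] ∧ PySem.Chars.strIsalpha [a] = true) := by
      simp only [iqwGood, List.getElem?_cons_succ, List.getElem?_cons_zero,
        Option.some.injEq, List.cons.injEq, and_true, hs, le_refl, true_and]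
      constructor
      · rintro ⟨c', hsep, hb, hc, ha⟩
        subst hb
        exact ⟨by rw [hc]; exact hsep, hc, ha⟩
      · rintro ⟨hsep, hcb, ha⟩
        exact ⟨b, by rw [← hcb]; exact hsep, rfl, hcb, ha⟩
    have hsplit : (∃ j, iqwGood (a :: b :: c :: rest) (j + 1)) ↔
        (iqwGood (a :: b :: c :: rest) 1 ∨ ∃ j, iqwGood (b :: c :: rest) (j + 1)) := by
      constructor
      · rintro ⟨j, hj⟩
        match j with
        | 0 => exact Or.inl hj
        | j + 1 => exact Or.inr ⟨j, (iqw_good_shift a _ j).mp hj⟩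
      · rintro (h | ⟨j, hj⟩)
        · exact ⟨0, h⟩
        · exact ⟨j + 1, (iqw_good_shift a _ j).mpr hj⟩
    by_cases h : (c = '_' ∨ c = '.') ∧ [c] = [b] ∧ PySem.Chars.strIsalpha [a] = true
    · have hA : iqwLoopA [a] [b] (c :: rest) = true := by
        simp only [iqwLoopA]; rw [if_pos h]
      rw [hA, hsplit]
      exact iff_of_true rfl (Or.inl (hgood1.mpr h))
    · have hA : iqwLoopA [a] [b] (c :: rest) = iqwLoopA [b] [c] rest := by
        simp only [iqwLoopA]; rw [if_neg h]
      rw [hA, ih b c, hsplit]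
      constructor
      · exact Or.inr
      · rintro (hh | hh)
        · exact absurd (hgood1.mp hh) h
        · exact hh

theorem iqw_A_char (l : List Char) :
    iqwLoopA [] [] l = true ↔ ∃ j, iqwGood l j := by
  match l with
  | [] => simp [iqwLoopA, iqwGood]
  | [c] => simp [iqwLoopA, iqwGood]
  | a :: b :: rest =>
    have h1 : iqwLoopA [] [] (a :: b :: rest) = iqwLoopA [a] [b] rest := by
      simp [iqwLoopA, PySem.Chars.strIsalpha]
    rw [h1, iqw_loopA_iff]
    constructor
    · rintro ⟨j, hj⟩; exact ⟨j + 1, hj⟩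
    · rintro ⟨j, hj⟩
      match j with
      | 0 => exact absurd hj.1 (by omega)
      | j + 1 => exact ⟨j, hj⟩

theorem iqw_prefix_pair (a b : Char) (l : List Char) (j : Nat) :
    [a, b] <+: l.drop j ↔ l[j]? = some a ∧ l[j + 1]? = some b := by
  rw [List.cons_prefix_iff]
  constructor
  · rintro ⟨t, ht, hpre⟩
    rw [List.cons_prefix_iff] at hpre
    obtain ⟨t', ht', -⟩ := hpre
    have h0 : (l.drop j)[0]? = some a := by rw [ht]; rfl
    have h1 : (l.drop j)[1]? = some b := by rw [ht, ht']; rfl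
    rw [List.getElem?_drop] at h0 h1
    simpa using ⟨h0, h1⟩
  · rintro ⟨h0, h1⟩
    have h0' : (l.drop j)[0]? = some a := by rw [List.getElem?_drop]; simpa using h0
    have h1' : (l.drop j)[1]? = some b := by rw [List.getElem?_drop]; simpa using h1
    match hd : l.drop j with
    | [] => rw [hd] at h0'; simp at h0'
    | [x] => rw [hd] at h0' h1'; simp at h0' h1'
    | x :: y :: t =>
      rw [hd] at h0' h1'
      simp at h0' h1'
      exact ⟨y :: t, by rw [h0'], by rw [List.cons_prefix_iff]; exact ⟨t, by rw [h1'], List.nil_prefix⟩⟩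

theorem iqw_find_iff (c : Char) (cs : List Char) : ∀ fuel start : Nat,
    1 ≤ start → start ≤ cs.length → cs.length < start + fuel →
    (iqwFind cs [c, c] start fuel = true ↔
      ∃ j, start ≤ j ∧ cs[j]? = some c ∧ cs[j + 1]? = some c ∧
        PySem.Chars.isalpha (cs.getD (j - 1) ' ') = true) := by
  intro fuel
  induction fuel with
  | zero => intro start h1 h2 h3; omega
  | succ fuel ih =>
    intro start h1 h2 h3
    by_cases hidx : PySem.Chars.findFrom cs [c, c] (start : Int) none = -1
    · have hnone : ∀ j, start ≤ j → ¬ ([c, c] <+: cs.drop j) := by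
        intro j hj hpre
        have hinf : [c, c] <:+: cs.drop start := by
          rw [← PySem.Chars.isIn_iff_infix, ← PySem.Chars.exists_prefix_drop_iff_isIn]
          exact ⟨j - start, by rw [List.drop_drop, Nat.add_sub_cancel' hj]; exact hpre⟩
        exact ((PySem.Chars.findFrom_natCast_eq_neg_one_iff cs [c, c] start h2).mp hidx) hinf
      have hfalse : iqwFind cs [c, c] start (fuel + 1) = false := by
        simp only [iqwFind]; rw [if_pos hidx]
      rw [hfalse]
      refine iff_of_false (by simp) ?_
      rintro ⟨j, hj, h0, h1', -⟩
      exact hnone j hj ((iqw_prefix_pair c c cs j).mpr ⟨h0, h1'⟩)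
    · obtain ⟨hge, hpre, hmin⟩ := PySem.Chars.findFrom_natCast_spec cs [c, c] start h2 hidx
      set idx := PySem.Chars.findFrom cs [c, c] (start : Int) none with hidxdef
      have hge' : start ≤ idx.toNat := by omega
      obtain ⟨hp0, hp1⟩ := (iqw_prefix_pair c c cs idx.toNat).mp hpre
      have hlen : idx.toNat + 1 < cs.length := by
        by_contra hcon
        rw [List.getElem?_eq_none (by omega)] at hp1
        simp at hp1
      by_cases halpha : PySem.Chars.isalpha (cs.getD (idx.toNat - 1) ' ') = true
      · have htrue : iqwFind cs [c, c] start (fuel + 1) = true := by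
          simp only [iqwFind]; rw [if_neg hidx, if_pos halpha]
        rw [htrue]
        exact iff_of_true rfl ⟨idx.toNat, hge', hp0, hp1, halpha⟩
      · have hstep : iqwFind cs [c, c] start (fuel + 1) = iqwFind cs [c, c] (idx.toNat + 1) fuel := by
          simp only [iqwFind]; rw [if_neg hidx, if_neg halpha]
        rw [hstep, ih (idx.toNat + 1) (by omega) (by omega) (by omega)]
        constructor
        · rintro ⟨j, hj, rest⟩; exact ⟨j, by omega, rest⟩
        · rintro ⟨j, hj, h0, h1', ha⟩
          rcases Nat.lt_or_ge j (idx.toNat + 1) with hlt | hge2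
          · by_cases hji : j = idx.toNat
            · subst hji; exact absurd ha halpha
            · exact absurd ((iqw_prefix_pair c c cs j).mpr ⟨h0, h1'⟩) (hmin j hj (by omega))
          · exact ⟨j, hge2, h0, h1', ha⟩

theorem iqw_B_char (l : List Char) :
    ((if iqwFind l ['_', '_'] 1 l.length then true else iqwFind l ['.', '.'] 1 l.length) = true)
      ↔ ∃ j, iqwGood l j := by
  have hif : ((if iqwFind l ['_', '_'] 1 l.length then true else iqwFind l ['.', '.'] 1 l.length) = true)
      ↔ (iqwFind l ['_', '_'] 1 l.length = true ∨ iqwFind l ['.', '.'] 1 l.length = true) := by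
    by_cases h : iqwFind l ['_', '_'] 1 l.length = true <;> simp [h]
  rw [hif]
  match l with
  | [] => simp [iqwFind, iqwGood]
  | x :: t =>
    have hlen : 1 ≤ (x :: t).length := by simp
    rw [iqw_find_iff '_' (x :: t) (x :: t).length 1 le_rfl hlen (by omega),
        iqw_find_iff '.' (x :: t) (x :: t).length 1 le_rfl hlen (by omega)]
    constructor
    · rintro (⟨j, hj, h0, h1, ha⟩ | ⟨j, hj, h0, h1, ha⟩)
      · exact ⟨j, hj, '_', Or.inl rfl, h0, h1, ha⟩
      · exact ⟨j, hj, '.', Or.inr rfl, h0, h1, ha⟩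
    · rintro ⟨j, hj, c, (rfl | rfl), h0, h1, ha⟩
      · exact Or.inl ⟨j, hj, h0, h1, ha⟩
      · exact Or.inr ⟨j, hj, h0, h1, ha⟩

-- ===== VERDICT (by name: the statement is the Claim_ definition above) =====
theorem is_question_word_spec : Claim_equal_is_question_word := by
  intro word _
  unfold Spec_is_question_word is_question_word is_question_word_alt
  rw [Bool.eq_iff_iff, iqw_A_char, iqw_B_char]
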